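-- pv_equiv track=rewrite | github.com/alireza5522/10-fingers-type-telegram-but | plugins/test_type_section/test_type_section_functions.py | rate_typing
-- ===== SOURCE A (Python) =====
-- def rate_typing(accuracy, speed):
--     rating_criteria = {
--         (95, 50): 5,
--         (95, 30): 4,
--         (90, 50): 4,
--         (90, 30): 3,
--         (80, 30): 2
--     }
--
--     for (acc_threshold, spd_threshold), stars in rating_criteria.items():
--         if accuracy > acc_threshold and speed > spd_threshold:
--             return stars
--     return 1
-- ===== SOURCE B (Python) =====
-- def rate_typing(accuracy, speed):
--     # Nested tier dispatch: branch on accuracy tier, then speed tier.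
--     if accuracy > 95:
--         if speed > 50:
--             return 5
--         if speed > 30:
--             return 4
--         return 1
--     if accuracy > 90:
--         if speed > 50:
--             return 4
--         if speed > 30:
--             return 3
--         return 1
--     if accuracy > 80:
--         if speed > 30:
--             return 2
--         return 1
--     return 1
-- ===== Notes on version B (the rewrite author's own statement) =====
-- stated objective: simpler
-- what changed: Replaces the dict-of-threshold-pairs scan with a direct nested conditional that dispatches first on the accuracy tier, then on the speed tier.
import Mathlib
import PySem

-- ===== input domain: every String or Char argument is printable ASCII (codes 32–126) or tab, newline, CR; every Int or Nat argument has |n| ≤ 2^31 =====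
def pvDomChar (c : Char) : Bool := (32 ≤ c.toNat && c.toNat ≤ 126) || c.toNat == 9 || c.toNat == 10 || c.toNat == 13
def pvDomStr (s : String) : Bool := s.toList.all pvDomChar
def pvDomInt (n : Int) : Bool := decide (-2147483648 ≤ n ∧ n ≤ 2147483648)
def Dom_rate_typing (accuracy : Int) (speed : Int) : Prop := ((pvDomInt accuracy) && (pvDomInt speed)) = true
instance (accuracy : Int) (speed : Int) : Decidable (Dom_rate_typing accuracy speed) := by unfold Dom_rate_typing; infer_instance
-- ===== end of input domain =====

-- B replaces A's precedence-ordered threshold-table scan with a nested accuracy-tier / speed-tier conditional; objective: simpler.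

-- ===== PORT A =====
-- A iterates over the dict's items in insertion order, returning the first entry whose
-- thresholds are both exceeded; ported as structural recursion over that item list.
def rateScan (accuracy : Int) (speed : Int) : List ((Int × Int) × Int) → Int
  | [] => 1
  | ((accT, spdT), stars) :: rest =>
      if accuracy > accT ∧ speed > spdT then stars
      else rateScan accuracy speed rest

def rate_typing (accuracy : Int) (speed : Int) : Int :=
  rateScan accuracy speed
    [((95, 50), 5), ((95, 30), 4), ((90, 50), 4), ((90, 30), 3), ((80, 30), 2)]

-- ===== PORT B =====
def rate_typing_alt (accuracy : Int) (speed : Int) : Int :=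
  if accuracy > 95 then
    if speed > 50 then 5
    else if speed > 30 then 4
    else 1
  else if accuracy > 90 then
    if speed > 50 then 4
    else if speed > 30 then 3
    else 1
  else if accuracy > 80 then
    if speed > 30 then 2
    else 1
  else 1

-- ===== PRECONDITION & SPEC =====
def Spec_rate_typing (accuracy : Int) (speed : Int) (out : Int) : Prop := out = rate_typing_alt accuracy speed
instance (accuracy : Int) (speed : Int) (out : Int) : Decidable (Spec_rate_typing accuracy speed out) := by unfold Spec_rate_typing; infer_instance

-- ===== CLAIM (what is proved, stated in full; the proofs are below) =====
def Claim_equal_rate_typing : Prop := ∀ (accuracy : Int) (speed : Int), Dom_rate_typing accuracy speed → Spec_rate_typing accuracy speed (rate_typing accuracy speed)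

-- ===== LEMMAS AND PROOFS =====

-- ===== VERDICT (by name: the statement is the Claim_ definition above) =====
theorem rate_typing_spec : Claim_equal_rate_typing := by
  intro accuracy speed _
  simp only [Spec_rate_typing, rate_typing, rateScan, rate_typing_alt]
  split_ifs <;> omega
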